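-- pv_equiv track=rewrite | github.com/bessman/aoc | 2024/9/main.py | fragment
-- ===== SOURCE A (Python) =====
-- def fragment(filesystem: list[int]):
--     """Generate a fragmented filesystem representation.
--
--     This function does not actually move any files around; it only calculates the
--     representation that would result if the files were fragmented and moved.
--     """
--     frag = filesystem[:]
--     tail_id = 0
--     tail_size = 0
--
--     for i, b in enumerate(frag):
--         if i % 2:  # Empty memory block.
--             while b:
--                 if not tail_size:
--                     tail_size = frag.pop()
--                     frag.pop()
--                     tail_id = len(frag) // 2 + 1
--
--                 yield tail_id
--                 b -= 1
--                 tail_size -= 1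
--         else:  # File block.
--             while b:
--                 yield i // 2
--                 b -= 1
--
--     while tail_size:
--         yield tail_id
--         tail_size -= 1
-- ===== SOURCE B (Python) =====
-- def fragment(filesystem: list[int]):
--     """Generate a fragmented filesystem representation.
--
--     Pure two-cursor scan over the immutable input (no copy, no pops): a left
--     cursor walks the map while a right cursor consumes tail files pair-wise;
--     gaps are filled in whole chunks of min(gap left, tail left) blocks.
--     """
--     n = len(filesystem)
--     i = 0
--     right = n
--     tail_id = 0
--     tail_size = 0
--     while i < right:
--         size = filesystem[i]
--         if i % 2 == 0:  # File block.
--             yield from [i // 2] * size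
--         else:  # Empty memory block.
--             while size > 0:
--                 if tail_size == 0:
--                     right -= 2
--                     tail_size = filesystem[right + 1]
--                     tail_id = right // 2 + 1
--                 take = min(size, tail_size)
--                 yield from [tail_id] * take
--                 size -= take
--                 tail_size -= take
--         i += 1
--     yield from [tail_id] * tail_size
-- ===== Notes on version B (the rewrite author's own statement) =====
-- stated objective: alternative
-- what changed: B replaces A's mutating generator (copying the list, popping pairs off the end, decrementing one block per loop iteration) by a pure two-cursor scan over the immutable input that fills each gap in whole chunks of min(gap-left, tail-left) blocks instead of one block at a time.
-- outside the precondition, e.g. on fragment([0, 2, 1, -5, 2]): A returns [2, 2, 1], B returns [2, 2, 1]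
import Mathlib
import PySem

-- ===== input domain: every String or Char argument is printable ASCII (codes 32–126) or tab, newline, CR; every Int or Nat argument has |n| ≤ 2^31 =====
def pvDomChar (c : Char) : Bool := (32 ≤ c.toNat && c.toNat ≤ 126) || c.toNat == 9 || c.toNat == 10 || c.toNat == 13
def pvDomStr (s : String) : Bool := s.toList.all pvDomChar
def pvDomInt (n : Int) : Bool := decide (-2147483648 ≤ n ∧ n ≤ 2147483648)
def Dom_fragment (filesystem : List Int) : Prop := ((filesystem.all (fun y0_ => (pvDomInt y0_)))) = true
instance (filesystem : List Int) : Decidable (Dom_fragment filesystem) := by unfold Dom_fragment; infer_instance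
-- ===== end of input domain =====

-- B is an 'alternative' re-implementation: a pure two-cursor scan without list mutation,
-- filling gaps chunk-wise instead of one block per iteration; return values proved equal on Pre_.

-- ===== PORT A =====
-- A is a generator; its port returns the list of yielded values.
-- 'while b:' / 'while tail_size:' loops are ported as recursion on the .toNat of the
-- counter: exact for the non-negative counters admitted by Pre_ (Python diverges on
-- negative counters, which Pre_ excludes).

-- port of a unit yield loop 'while c: yield x; c -= 1'
def unitYield (x : Int) : Nat → List Int
  | 0 => []
  | c + 1 => x :: unitYield x c

-- port of A's inner gap loop 'while b: if not tail_size: …pop…pop…; yield tail_id; b -= 1; tail_size -= 1'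
-- returns (yielded values, (frag, tail_id, tail_size)).  'none' from pop? is where Python raises
-- IndexError (outside Pre_); the port bails out there.
def fragGapA (frag : List Int) (tid ts : Int) : Nat → List Int × List Int × Int × Int
  | 0 => ([], frag, tid, ts)
  | c + 1 =>
    if ts = 0 then
      match PySem.List.pop? frag with
      | none => ([], frag, tid, ts)
      | some (v, f1) =>
        match PySem.List.pop? f1 with
        | none => ([], f1, tid, ts)
        | some (_, f2) =>
          let tid' : Int := ((f2.length / 2 : Nat) : Int) + 1
          let r := fragGapA f2 tid' (v - 1) c
          (tid' :: r.1, r.2)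
    else
      let r := fragGapA frag tid (ts - 1) c
      (tid :: r.1, r.2)

-- termination helper for the outer loop (frag only shrinks); cited by fragLoop's decreasing_by
theorem fragGapA_length_le (frag : List Int) (tid ts : Int) (c : Nat) :
    (fragGapA frag tid ts c).2.1.length ≤ frag.length := by
  induction c generalizing frag tid ts with
  | zero => simp [fragGapA]
  | succ c ih =>
    simp only [fragGapA]
    split
    · rcases hp : PySem.List.pop? frag with _ | ⟨v, f1⟩
      · simp
      · have l1 : f1.length + 1 = frag.length := PySem.List.length_of_pop?_eq_some frag hp
        rcases hp2 : PySem.List.pop? f1 with _ | ⟨w, f2⟩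
        · simp only [hp2]
          omega
        · have l2 : f2.length + 1 = f1.length := PySem.List.length_of_pop?_eq_some f1 hp2
          simp only [hp2]
          have := ih f2 (((f2.length / 2 : Nat) : Int) + 1) (v - 1)
          omega
    · exact ih frag tid (ts - 1)

-- port of A's outer 'for i, b in enumerate(frag)' (the iterator reads the current list,
-- stopping once i reaches the shrunken length) followed by the final flush loop
def fragLoop (frag : List Int) (i : Nat) (tid ts : Int) : List Int :=
  if h : i < frag.length then
    if i % 2 = 1 then
      let r := fragGapA frag tid ts (frag.getD i 0).toNat
      r.1 ++ fragLoop r.2.1 (i + 1) r.2.2.1 r.2.2.2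
    else
      unitYield ((i / 2 : Nat) : Int) (frag.getD i 0).toNat ++ fragLoop frag (i + 1) tid ts
  else
    unitYield tid ts.toNat
  termination_by frag.length - i
  decreasing_by
  · have := fragGapA_length_le frag tid ts (frag.getD i 0).toNat
    omega
  · omega

def fragment (filesystem : List Int) : List Int := fragLoop filesystem 0 0 0

-- ===== PORT B =====
-- port of Source B's inner chunked gap loop; fuel only makes the recursion total (inside Pre_
-- every iteration consumes at least one block, so the fuel given below never runs out).
-- returns (yielded values, (right, tail_id, tail_size)).
def altGap (fs : List Int) (R tid ts size : Int) : Nat → List Int × Int × Int × Int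
  | 0 => ([], R, tid, ts)
  | f + 1 =>
    if size > 0 then
      if ts = 0 then
        match PySem.List.pyGet? fs (R - 2 + 1) with
        | none => ([], R - 2, tid, ts)   -- Python raises IndexError here (outside Pre_)
        | some v =>
          let tid' := PySem.Int.floordiv (R - 2) 2 + 1
          let take := min size v
          let r := altGap fs (R - 2) tid' (v - take) (size - take) f
          (List.replicate take.toNat tid' ++ r.1, r.2)
      else
        let take := min size ts
        let r := altGap fs R tid (ts - take) (size - take) f
        (List.replicate take.toNat tid ++ r.1, r.2)
    else ([], R, tid, ts)

-- termination helper for B's outer loop (right only decreases); cited by altLoop's decreasing_by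
theorem altGap_R_le (fs : List Int) (R tid ts size : Int) (f : Nat) :
    (altGap fs R tid ts size f).2.1 ≤ R := by
  induction f generalizing R tid ts size with
  | zero => simp [altGap]
  | succ f ih =>
    simp only [altGap]
    split
    · split
      · rcases PySem.List.pyGet? fs (R - 2 + 1) with _ | v
        · simp only []; omega
        · simp only []
          have := ih (R - 2) (PySem.Int.floordiv (R - 2) 2 + 1) (v - min size v) (size - min size v)
          omega
      · exact ih R tid (ts - min size ts) (size - min size ts)
    · simp

def altLoop (fs : List Int) (i R tid ts : Int) : List Int :=
  if h : i < R then
    match PySem.List.pyGet? fs i with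
    | none => []   -- Python raises IndexError here (outside Pre_)
    | some size =>
      if PySem.Int.mod i 2 = 0 then
        List.replicate size.toNat (PySem.Int.floordiv i 2) ++ altLoop fs (i + 1) R tid ts
      else
        let r := altGap fs R tid ts size (size.toNat + 1)
        r.1 ++ altLoop fs (i + 1) r.2.1 r.2.2.1 r.2.2.2
  else
    List.replicate ts.toNat tid
  termination_by (R - i).toNat
  decreasing_by
  · omega
  · have := altGap_R_le fs R tid ts size (size.toNat + 1)
    omega

def fragment_alt (filesystem : List Int) : List Int :=
  altLoop filesystem 0 (filesystem.length : Int) 0 0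

-- ===== PRECONDITION & SPEC =====
-- Static demand/supply bookkeeping over the input (no simulation):
-- gdem i  = total gap demand of the odd positions ≤ i;
-- vsup j  = size of the j-th file popped from the right (index n-2j+1), a sentinel larger
--           than all demand when fewer than two elements would remain (Python would raise);
-- ssup j  = supply of the first j pops;  kcnt i = pops forced before the scan reaches gap i;
-- a pop j+1 is forced (occursPop j) when some reachable gap's demand exceeds ssup j.
def gdem (fs : List Int) (i : Nat) : Int :=
  (((List.range (i + 1)).filter (fun k => k % 2 = 1)).map (fun k => fs.getD k 0)).sum

def vsup (fs : List Int) (j : Nat) : Int :=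
  if 1 ≤ (fs.length : Int) - 2 * j + 1 then fs.getD ((fs.length : Int) - 2 * j + 1).toNat 0
  else gdem fs fs.length + 1

def ssup (fs : List Int) (j : Nat) : Int := ((List.range j).map (fun t => vsup fs (t + 1))).sum

def kcnt (fs : List Int) (i : Nat) : Nat :=
  ((List.range fs.length).filter (fun j => decide (ssup fs j < gdem fs (i - 2)))).length

def entered (fs : List Int) (i : Nat) : Prop :=
  i % 2 = 1 ∧ (i : Int) < (fs.length : Int) - 2 * (kcnt fs i : Int)

def occursPop (fs : List Int) (j : Nat) : Prop :=
  ∃ i, i < fs.length ∧ entered fs i ∧ ssup fs j < gdem fs i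

-- Pre_ = exactly the inputs on which the Python A returns normally: all entries are
-- non-negative (a negative reached entry or popped size makes A loop forever), and every
-- forced pop must find at least two remaining elements (else IndexError) and pop a
-- positive size (a popped zero sends tail_size negative and the final flush loops forever).
-- It also excludes inputs whose only negatives sit at positions A pops and DISCARDS unread
-- (A still returns there; B returns the same value — see claim cites).
def Pre_fragment (filesystem : List Int) : Prop :=
  (∀ x ∈ filesystem, 0 ≤ x) ∧
  ∀ j, j < filesystem.length → occursPop filesystem j →
    (1 ≤ (filesystem.length : Int) - 2 * ((j : Int) + 1) + 1 ∧ 0 < vsup filesystem (j + 1))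

instance (filesystem : List Int) : Decidable (Pre_fragment filesystem) := by
  unfold Pre_fragment occursPop entered; infer_instance

def pvWitness_fragment : List Int := [1, 2, 3]

def Spec_fragment (filesystem : List Int) (out : List Int) : Prop := out = fragment_alt filesystem
instance (filesystem : List Int) (out : List Int) : Decidable (Spec_fragment filesystem out) := by unfold Spec_fragment; infer_instance

-- ===== CLAIM (what is proved, stated in full; the proofs are below) =====
def Claim_equal_fragment : Prop := ∀ (filesystem : List Int), Dom_fragment filesystem → Pre_fragment filesystem → Spec_fragment filesystem (fragment filesystem)

-- ===== LEMMAS AND PROOFS =====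

theorem unitYield_eq (x : Int) (c : Nat) : unitYield x c = List.replicate c x := by
  induction c with
  | zero => rfl
  | succ c ih => simp [unitYield, ih, List.replicate_succ]

theorem gdem_succ (fs : List Int) (k : Nat) :
    gdem fs (k + 1) = gdem fs k + (if (k + 1) % 2 = 1 then fs.getD (k + 1) 0 else 0) := by
  unfold gdem
  rw [List.range_succ, List.filter_append, List.map_append, List.sum_append]
  split <;> simp_all

theorem gdem_even (fs : List Int) (k : Nat) (hk : 1 ≤ k) (he : k % 2 = 0) :
    gdem fs k = gdem fs (k - 1) := by
  obtain ⟨k', rfl⟩ : ∃ k', k = k' + 1 := ⟨k - 1, by omega⟩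
  rw [gdem_succ, if_neg (by omega)]
  simp

theorem gdem_odd (fs : List Int) (k : Nat) (ho : k % 2 = 1) :
    gdem fs k = gdem fs (k - 1) + fs.getD k 0 := by
  obtain ⟨k', rfl⟩ : ∃ k', k = k' + 1 := ⟨k - 1, by omega⟩
  rw [gdem_succ, if_pos ho]
  simp

theorem gdem_nonneg (fs : List Int) (Hnn : ∀ x ∈ fs, 0 ≤ x) (i : Nat) : 0 ≤ gdem fs i := by
  unfold gdem
  apply List.sum_nonneg
  intro x hx
  simp only [List.mem_map] at hx
  obtain ⟨k, -, rfl⟩ := hx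
  by_cases h : k < fs.length
  · rw [List.getD_eq_getElem _ _ h]
    exact Hnn _ (List.getElem_mem h)
  · rw [List.getD_eq_default _ _ (by omega)]

theorem vsup_nonneg (fs : List Int) (Hnn : ∀ x ∈ fs, 0 ≤ x) (j : Nat) : 0 ≤ vsup fs j := by
  unfold vsup
  split
  · by_cases h : ((fs.length : Int) - 2 * j + 1).toNat < fs.length
    · rw [List.getD_eq_getElem _ _ h]
      exact Hnn _ (List.getElem_mem h)
    · rw [List.getD_eq_default _ _ (by omega)]
  · have := gdem_nonneg fs Hnn fs.length
    omega

theorem ssup_succ (fs : List Int) (j : Nat) :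
    ssup fs (j + 1) = ssup fs j + vsup fs (j + 1) := by
  unfold ssup
  rw [List.range_succ]
  simp

theorem ssup_mono (fs : List Int) (Hnn : ∀ x ∈ fs, 0 ≤ x) {j j' : Nat} (h : j ≤ j') :
    ssup fs j ≤ ssup fs j' := by
  induction j' with
  | zero =>
    have : j = 0 := by omega
    simp [this]
  | succ j' ih =>
    rcases Nat.lt_or_ge j (j' + 1) with hlt | hge
    · have h1 := ih (by omega)
      have h2 := vsup_nonneg fs Hnn (j' + 1)
      rw [ssup_succ]
      omega
    · have : j = j' + 1 := by omega
      simp [this]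

theorem filter_range_lt_length (q : Nat → Bool) : ∀ (n p : Nat), p ≤ n →
    (∀ j < n, q j = decide (j < p)) → ((List.range n).filter q).length = p := by
  intro n
  induction n with
  | zero =>
    intro p hp _
    interval_cases p
    simp
  | succ n ih =>
    intro p hp h
    rw [List.range_succ, List.filter_append]
    rcases Nat.lt_or_ge p (n + 1) with hlt | hge
    · have hq : q n = false := by rw [h n (by omega)]; simp; omega
      have := ih p (by omega) (fun j hj => h j (by omega))
      simp [hq, this]
    · have hpn : p = n + 1 := by omega
      subst hpn
      have hq : q n = true := by rw [h n (by omega)]; simp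
      have := ih n (by omega) (fun j hj => by
        rw [h j (by omega)]
        simp only [decide_eq_decide]
        omega)
      simp [hq, this]

theorem kcnt_eq (fs : List Int) (Hnn : ∀ x ∈ fs, 0 ≤ x) (i : Nat) (p : Nat) (hp : p ≤ fs.length)
    (hlt : ∀ j < p, ssup fs j < gdem fs (i - 2))
    (hge : gdem fs (i - 2) ≤ ssup fs p) :
    kcnt fs i = p := by
  unfold kcnt
  apply filter_range_lt_length _ _ _ hp
  intro j hj
  by_cases hjp : j < p
  · simp [hlt j hjp, hjp]
  · have : ssup fs p ≤ ssup fs j := ssup_mono fs Hnn (by omega)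
    simp only [decide_eq_decide]
    constructor
    · intro hc; omega
    · intro hc; omega

theorem take_getD (fs : List Int) (r i : Nat) (h : i < r) :
    (fs.take r).getD i 0 = fs.getD i 0 := by
  by_cases h2 : i < fs.length
  · rw [List.getD_eq_getElem _ _ (by simp; omega), List.getD_eq_getElem _ _ h2]
    simp
  · rw [List.getD_eq_default _ _ (by simp; omega), List.getD_eq_default _ _ (by omega)]

theorem pop_take (fs : List Int) (r : Nat) (h1 : 1 ≤ r) (h2 : r ≤ fs.length) :
    PySem.List.pop? (fs.take r) = some (fs.getD (r - 1) 0, fs.take (r - 1)) := by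
  have hr : r = (r - 1) + 1 := by omega
  rw [hr, List.take_succ]
  have hg : fs[r - 1]?.toList = [fs.getD (r - 1) 0] := by
    rw [List.getElem?_eq_getElem (by omega), List.getD_eq_getElem _ _ (by omega)]
    rfl
  rw [hg]
  exact PySem.List.pop?_last _ _

theorem take_length_eq (fs : List Int) (r : Nat) (h : r ≤ fs.length) :
    (fs.take r).length = r := by simp; omega

-- unit steps of A's gap loop while tail blocks remain
theorem fragGapA_units (frag : List Int) (tid : Int) (t c : Nat) :
    ∀ ts : Int, (t : Int) ≤ ts →
    fragGapA frag tid ts (t + c) =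
      (List.replicate t tid ++ (fragGapA frag tid (ts - t) c).1, (fragGapA frag tid (ts - t) c).2) := by
  induction t with
  | zero => intro ts h; simp
  | succ t ih =>
    intro ts h
    have hts : ¬ ts = 0 := by omega
    have : t + 1 + c = (t + c) + 1 := by omega
    rw [this]
    show fragGapA frag tid ts ((t + c) + 1) = _
    rw [fragGapA]
    rw [if_neg hts]
    rw [ih (ts - 1) (by omega)]
    have : ts - 1 - t = ts - (t + 1 : Nat) := by push_cast; ring
    rw [this]
    simp [List.replicate_succ]

-- the inner gap loop: A's one-block-at-a-time run equals B's chunked run, and the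
-- supply bookkeeping of Pre_ is maintained
theorem gap_eq (fs : List Int) (Hnn : ∀ x ∈ fs, 0 ≤ x)
    (Hpre : ∀ j, j < fs.length → occursPop fs j →
      (1 ≤ (fs.length : Int) - 2 * ((j : Int) + 1) + 1 ∧ 0 < vsup fs (j + 1)))
    (i : Nat) (hodd : i % 2 = 1) (p0 : Nat) (hk : kcnt fs i = p0)
    (hi : (i : Int) < (fs.length : Int) - 2 * (p0 : Int)) :
    ∀ (m : Nat) (sz ts tid : Int) (p : Nat), sz.toNat = m →
    p0 ≤ p → 2 * p ≤ fs.length → 0 ≤ sz → sz ≤ fs.getD i 0 → 0 ≤ ts →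
    ssup fs p = gdem fs (i - 2) + (fs.getD i 0 - sz) + ts →
    (∀ j < p, ssup fs j < gdem fs i) →
    ∃ (p' : Nat) (tid' ts' : Int) (ys : List Int),
      p ≤ p' ∧ 2 * p' ≤ fs.length ∧ 0 ≤ ts' ∧
      ssup fs p' = gdem fs (i - 2) + fs.getD i 0 + ts' ∧
      (∀ j < p', ssup fs j < gdem fs i) ∧
      fragGapA (fs.take (fs.length - 2 * p)) tid ts sz.toNat = (ys, fs.take (fs.length - 2 * p'), tid', ts') ∧
      (∀ fuel, sz.toNat + 1 ≤ fuel →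
        altGap fs ((fs.length : Int) - 2 * p) tid ts sz fuel = (ys, (fs.length : Int) - 2 * p', tid', ts')) := by
  intro m
  induction m using Nat.strong_induction_on with
  | _ m IH =>
  intro sz ts tid p hm hp0p h2p hsz0 hszle hts0 hbook htrig
  by_cases hszpos : 0 < sz
  · have hin : i < fs.length := by omega
    have hgd1 : gdem fs (i - 1) = gdem fs (i - 2) := by
      by_cases hone : i = 1
      · subst hone; rfl
      · have : i - 1 - 1 = i - 2 := by omega
        rw [← this]
        exact gdem_even fs (i - 1) (by omega) (by omega)
    have hgodd : gdem fs i = gdem fs (i - 2) + fs.getD i 0 := by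
      rw [gdem_odd fs i hodd, hgd1]
    by_cases hts : ts = 0
    · -- pop case: A pops a pair off the end, B moves the right cursor by 2
      have hlt : ssup fs p < gdem fs i := by rw [hgodd]; omega
      have hocc : occursPop fs p := ⟨i, hin, ⟨hodd, by rw [hk]; exact hi⟩, hlt⟩
      have hplt : p < fs.length := by omega
      obtain ⟨hvalid, hvpos⟩ := Hpre p hplt hocc
      have hR2 : 2 * p + 2 ≤ fs.length := by omega
      have hvsup : vsup fs (p + 1) = fs.getD (fs.length - 2 * p - 1) 0 := by
        unfold vsup
        rw [if_pos (by push_cast; omega)]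
        congr 1
        omega
      have hvpos' : 0 < fs.getD (fs.length - 2 * p - 1) 0 := by rw [hvsup] at hvpos; exact hvpos
      set v := fs.getD (fs.length - 2 * p - 1) 0 with hv
      set tk := min sz v with htk
      have htk1 : 1 ≤ tk := by omega
      have htksz : tk ≤ sz := by omega
      have htkv : tk ≤ v := by omega
      set tid' : Int := ((((fs.length - 2 * (p + 1)) / 2 : Nat)) : Int) + 1 with htid'
      obtain ⟨p', tid'', ts'', ys, hpp', h2p', hts0', hbook', htrig', hA, hB⟩ :=
        IH (sz - tk).toNat (by omega) (sz - tk) (v - tk) tid' (p + 1) rfl (by omega) (by omega)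
          (by omega) (by omega) (by omega)
          (by rw [ssup_succ, hvsup]; omega)
          (by intro j hj
              rcases Nat.lt_or_ge j p with hjp | hjp
              · exact htrig j hjp
              · rwa [show j = p from by omega])
      have hrep : List.replicate tk.toNat tid' = tid' :: List.replicate (tk.toNat - 1) tid' := by
        have h1 : tk.toNat = (tk.toNat - 1) + 1 := by omega
        conv_lhs => rw [h1]
        rw [List.replicate_succ]
      refine ⟨p', tid'', ts'', List.replicate tk.toNat tid' ++ ys, by omega, h2p', hts0', ?_, htrig', ?_, ?_⟩
      · exact hbook'
      · -- A side
        rw [show sz.toNat = ((tk.toNat - 1) + (sz - tk).toNat) + 1 from by omega]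
        simp only [fragGapA]
        rw [if_pos hts,
            pop_take fs (fs.length - 2 * p) (by omega) (by omega)]
        simp only []
        rw [pop_take fs (fs.length - 2 * p - 1) (by omega) (by omega)]
        simp only []
        rw [take_length_eq fs (fs.length - 2 * p - 1 - 1) (by omega)]
        rw [fragGapA_units _ _ _ _ _ (by push_cast; omega)]
        rw [show v - 1 - ((tk.toNat - 1 : Nat) : Int) = v - tk from by push_cast; omega]
        rw [show fs.length - 2 * p - 1 - 1 = fs.length - 2 * (p + 1) from by omega]
        rw [← htid', hA, hrep]
        rfl
      · -- B side
        intro fuel hf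
        obtain ⟨f, rfl⟩ : ∃ f, fuel = f + 1 := ⟨fuel - 1, by omega⟩
        simp only [altGap]
        rw [if_pos (show (0:Int) < sz by omega), if_pos hts]
        rw [show (fs.length : Int) - 2 * p - 2 + 1 = ((fs.length - 2 * p - 1 : Nat) : Int) from by push_cast; omega]
        rw [PySem.List.pyGet?_natCast, List.getElem?_eq_getElem (by omega)]
        simp only []
        have hveq : fs[fs.length - 2 * p - 1] = v := by
          rw [hv, List.getD_eq_getElem _ _ (by omega)]
        have hfd : PySem.Int.floordiv ((fs.length : Int) - 2 * p - 2) 2 + 1 = tid' := by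
          rw [PySem.Int.floordiv_eq_ediv_of_pos (by omega), htid']
          rw [show (fs.length : Int) - 2 * p - 2 = ((fs.length - 2 * (p + 1) : Nat) : Int) from by push_cast; omega]
          norm_cast
        rw [hveq, hfd, ← htk]
        rw [show (fs.length : Int) - 2 * p - 2 = (fs.length : Int) - 2 * ((p : Int) + 1) from by ring]
        rw [show ((p : Int) + 1) = ((p + 1 : Nat) : Int) from by push_cast; ring]
        rw [hB f (by omega)]
    · -- chunk without pop
      set tk := min sz ts with htk
      have htk1 : 1 ≤ tk := by omega
      obtain ⟨p', tid'', ts'', ys, hpp', h2p', hts0', hbook', htrig', hA, hB⟩ :=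
        IH (sz - tk).toNat (by omega) (sz - tk) (ts - tk) tid p rfl hp0p h2p
          (by omega) (by omega) (by omega) (by rw [hbook]; ring)
          htrig
      refine ⟨p', tid'', ts'', List.replicate tk.toNat tid ++ ys, hpp', h2p', hts0', hbook', htrig', ?_, ?_⟩
      · rw [show sz.toNat = tk.toNat + (sz - tk).toNat from by omega]
        rw [fragGapA_units _ _ _ _ _ (by push_cast; omega)]
        rw [show ts - ((tk.toNat : Nat) : Int) = ts - tk from by push_cast; omega]
        rw [hA]
      · intro fuel hf
        obtain ⟨f, rfl⟩ : ∃ f, fuel = f + 1 := ⟨fuel - 1, by omega⟩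
        simp only [altGap]
        rw [if_pos (show (0:Int) < sz by omega), if_neg hts]
        rw [← htk, hB f (by omega)]
  · -- sz = 0: both loops exit immediately
    have hsz : sz = 0 := by omega
    refine ⟨p, tid, ts, [], le_refl _, h2p, hts0, by rw [hbook, hsz]; ring, htrig, ?_, ?_⟩
    · rw [show sz.toNat = 0 from by omega]
      rfl
    · intro fuel hf
      obtain ⟨f, rfl⟩ : ∃ f, fuel = f + 1 := ⟨fuel - 1, by omega⟩
      simp only [altGap]
      rw [if_neg (by omega)]

-- the outer scan: A's loop over the shrinking list equals B's two-cursor loop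
theorem loop_eq (fs : List Int) (Hnn : ∀ x ∈ fs, 0 ≤ x)
    (Hpre : ∀ j, j < fs.length → occursPop fs j →
      (1 ≤ (fs.length : Int) - 2 * ((j : Int) + 1) + 1 ∧ 0 < vsup fs (j + 1))) :
    ∀ (m : Nat) (i p : Nat) (tid ts : Int), fs.length - i = m → i ≤ fs.length →
    2 * p ≤ fs.length → 0 ≤ ts →
    ssup fs p = gdem fs (i - 1) + ts →
    (∀ j < p, ssup fs j < gdem fs (i - 1)) →
    fragLoop (fs.take (fs.length - 2 * p)) i tid ts =
      altLoop fs (i : Int) ((fs.length : Int) - 2 * p) tid ts := by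
  intro m
  induction m using Nat.strong_induction_on with
  | _ m IH =>
  intro i p tid ts hm hin h2p hts0 hbook htrig
  have hlen : (fs.take (fs.length - 2 * p)).length = fs.length - 2 * p :=
    take_length_eq fs _ (by omega)
  by_cases hiR : i < fs.length - 2 * p
  · -- scan alive
    have hinlt : i < fs.length := by omega
    rw [fragLoop, altLoop]
    rw [dif_pos (by omega : i < (fs.take (fs.length - 2 * p)).length),
        dif_pos (by push_cast; omega : (i : Int) < (fs.length : Int) - 2 * p)]
    rw [PySem.List.pyGet?_natCast, List.getElem?_eq_getElem hinlt]
    simp only []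
    have hgetd : (fs.take (fs.length - 2 * p)).getD i 0 = fs.getD i 0 := take_getD fs _ i hiR
    have hgete : fs[i] = fs.getD i 0 := by rw [List.getD_eq_getElem _ _ hinlt]
    have hmod : PySem.Int.mod (i : Int) 2 = ((i % 2 : Nat) : Int) := by
      rw [PySem.Int.mod_eq_emod_of_pos (by omega)]
      push_cast
      rfl
    by_cases hodd : i % 2 = 1
    · -- gap block
      rw [if_pos hodd, if_neg (by rw [hmod]; omega)]
      have hgd1 : gdem fs (i - 1) = gdem fs (i - 2) := by
        by_cases hone : i = 1
        · subst hone; rfl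
        · have h2 : i - 1 - 1 = i - 2 := by omega
          rw [← h2]
          exact gdem_even fs (i - 1) (by omega) (by omega)
      have hb0 : 0 ≤ fs.getD i 0 := by
        rw [← hgete]
        exact Hnn _ (List.getElem_mem hinlt)
      have hgodd : gdem fs i = gdem fs (i - 2) + fs.getD i 0 := by
        rw [gdem_odd fs i hodd, hgd1]
      have hkc : kcnt fs i = p :=
        kcnt_eq fs Hnn i p (by omega)
          (fun j hj => by have := htrig j hj; omega)
          (by omega)
      obtain ⟨p', tid', ts', ys, hpp', h2p', hts0', hbook', htrig', hA, hB⟩ :=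
        gap_eq fs Hnn Hpre i hodd p hkc (by push_cast; omega)
          (fs.getD i 0).toNat (fs.getD i 0) ts tid p rfl (le_refl p) h2p hb0 (le_refl _) hts0
          (by omega) (by intro j hj; have := htrig j hj; omega)
      rw [hgetd, hgete, hA, hB ((fs.getD i 0).toNat + 1) (le_refl _)]
      simp only []
      have hrec := IH (fs.length - (i + 1)) (by omega) (i + 1) p' tid' ts' rfl (by omega) h2p'
        hts0'
        (by simp only [Nat.add_sub_cancel]; omega)
        (by intro j hj
            have := htrig' j hj
            simp only [Nat.add_sub_cancel]
            omega)
      rw [show ((i : Int) + 1) = ((i + 1 : Nat) : Int) from by push_cast; ring]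
      rw [hrec]
    · -- file block
      rw [if_neg hodd, if_pos (by rw [hmod]; omega)]
      rw [hgetd, hgete, unitYield_eq]
      have hfd : PySem.Int.floordiv (i : Int) 2 = ((i / 2 : Nat) : Int) := by
        rw [PySem.Int.floordiv_eq_ediv_of_pos (by omega)]
        norm_cast
      rw [hfd]
      have hgde : gdem fs ((i + 1) - 1) = gdem fs (i - 1) := by
        by_cases hzero : i = 0
        · subst hzero; rfl
        · simp only [Nat.add_sub_cancel]
          exact gdem_even fs i (by omega) (by omega)
      have hrec := IH (fs.length - (i + 1)) (by omega) (i + 1) p tid ts rfl (by omega) h2p hts0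
        (by rw [hgde]; exact hbook) (fun j hj => by rw [hgde]; exact htrig j hj)
      rw [hrec]
      rw [show ((i : Int) + 1) = ((i + 1 : Nat) : Int) from by push_cast; ring]
  · -- scan done: both flush the open tail file
    rw [fragLoop, altLoop]
    rw [dif_neg (by omega : ¬ i < (fs.take (fs.length - 2 * p)).length),
        dif_neg (by push_cast; omega : ¬ (i : Int) < (fs.length : Int) - 2 * p)]
    rw [unitYield_eq]

theorem main_equiv (fs : List Int) (h : Pre_fragment fs) : fragment fs = fragment_alt fs := by
  obtain ⟨Hnn, Hpre⟩ := h
  have := loop_eq fs Hnn Hpre fs.length 0 0 0 0 (by omega) (by omega) (by omega) (by omega)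
    (by simp [ssup, gdem]) (by omega)
  simpa [fragment, fragment_alt] using this

-- ===== VERDICT (by name: the statement is the Claim_ definition above) =====
theorem fragment_spec : Claim_equal_fragment := by
  intro fs _ hpre
  exact main_equiv fs hpre
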